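-- pv_equiv track=rewrite | github.com/rubelw/OSSS | src/OSSS/ai/agents/query_data/handlers/attendance_events_handler.py | _select_attendance_events_fields
-- ===== SOURCE A (Python) =====
-- from typing import Any, Dict, List, Sequence
--
-- def _select_attendance_events_fields(
--     rows: Sequence[Dict[str, Any]],
-- ) -> List[str]:
--     if not rows:
--         return []
--
--     preferred_order = [
--         "id",
--         "student_id",
--         "student_number",
--         "student_name",
--         "event_timestamp",
--         "event_type",          # check-in, check-out, tardy, etc.
--         "source",              # kiosk, office, manual, etc.
--         "school_id",
--         "school_name",
--         "section_id",
--         "section_code",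
--         "notes",
--         "created_at",
--         "updated_at",
--     ]
--
--     all_keys: List[str] = []
--     for r in rows:
--         for k in r:
--             if k not in all_keys:
--                 all_keys.append(k)
--
--     ordered = [k for k in preferred_order if k in all_keys]
--     ordered.extend(k for k in all_keys if k not in ordered)
--     return ordered
-- ===== SOURCE B (Python) =====
-- from typing import Any, Dict, List, Sequence
--
-- def _select_attendance_events_fields(
--     rows: Sequence[Dict[str, Any]],
-- ) -> List[str]:
--     preferred_order = [
--         "id",
--         "student_id",
--         "student_number",
--         "student_name",
--         "event_timestamp",
--         "event_type",
--         "source",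
--         "school_id",
--         "school_name",
--         "section_id",
--         "section_code",
--         "notes",
--         "created_at",
--         "updated_at",
--     ]
--     base = len(preferred_order)
--     pref_rank = {k: i for i, k in enumerate(preferred_order)}
--     # every distinct key, in first-seen order
--     uniq = list(dict.fromkeys(k for r in rows for k in r))
--     # total rank: preferred keys sort by their preferred position (< base),
--     # all others after them by first-seen position
--     rank = {k: pref_rank.get(k, base + i) for i, k in enumerate(uniq)}
--     return sorted(uniq, key=rank.get)
-- ===== Notes on version B (the rewrite author's own statement) =====
-- stated objective: faster
-- what changed: Replaces A's staged build-then-filter-then-extend pipeline (quadratic list-membership scans) by a rank-and-sort scheme: every distinct key gets one numeric rank (its preferred-order index, or len(preferred)+first-seen index for the rest) and the answer is a single stable sort of the distinct keys by that rank.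
import Mathlib
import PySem

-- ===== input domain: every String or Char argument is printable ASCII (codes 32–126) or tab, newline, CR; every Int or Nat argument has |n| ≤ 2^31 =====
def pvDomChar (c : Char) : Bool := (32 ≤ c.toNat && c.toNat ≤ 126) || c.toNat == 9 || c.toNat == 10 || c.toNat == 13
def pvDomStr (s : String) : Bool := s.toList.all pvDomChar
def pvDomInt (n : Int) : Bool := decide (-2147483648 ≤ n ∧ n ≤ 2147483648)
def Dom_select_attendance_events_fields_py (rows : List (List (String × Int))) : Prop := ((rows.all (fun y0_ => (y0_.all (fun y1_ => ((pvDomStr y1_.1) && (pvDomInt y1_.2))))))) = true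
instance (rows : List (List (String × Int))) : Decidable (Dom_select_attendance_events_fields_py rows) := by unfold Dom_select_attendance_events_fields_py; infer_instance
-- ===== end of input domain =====

-- B replaces A's build-keys / filter / extend pipeline by a rank-and-sort scheme: each distinct
-- key gets one numeric rank and the result is one stable sort of the distinct keys by that rank.

-- the literal preferred_order list both Pythons spell out
def pvPreferredOrder : List String :=
  ["id", "student_id", "student_number", "student_name", "event_timestamp", "event_type",
   "source", "school_id", "school_name", "section_id", "section_code", "notes",
   "created_at", "updated_at"]

-- ===== PORT A =====
def select_attendance_events_fields_py (rows : List (List (String × Int))) : List String :=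
  if rows = [] then []
  else
    let allKeys : List String :=
      rows.foldl (fun acc r =>
        r.foldl (fun acc kv => if acc.contains kv.1 then acc else acc ++ [kv.1]) acc) []
    let ordered := pvPreferredOrder.filter (fun k => allKeys.contains k)
    -- ordered.extend(k for k in all_keys if k not in ordered): the generator tests the GROWING list
    allKeys.foldl (fun ord k => if ord.contains k then ord else ord ++ [k]) ordered

-- ===== PORT B =====
def select_attendance_events_fields_py_alt (rows : List (List (String × Int))) : List String :=
  let base : Int := (pvPreferredOrder.length : Int)
  let prefRank : PySem.Dict String Int :=
    (PySem.List.enumerate pvPreferredOrder).foldl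
      (fun d p => PySem.Dict.insert d p.2 p.1) PySem.Dict.empty
  let uniq : List String := PySem.List.dedup (rows.flatMap (fun r => r.map Prod.fst))
  let rank : PySem.Dict String Int :=
    (PySem.List.enumerate uniq).foldl
      (fun d p => PySem.Dict.insert d p.2 (PySem.Dict.getD prefRank p.2 (base + p.1))) PySem.Dict.empty
  -- Python's rank.get k never misses (every k of uniq is a key of rank), so the total getD
  -- with default 0 is exact here
  PySem.List.sorted uniq (fun k => PySem.Dict.getD rank k 0) false

-- ===== PRECONDITION & SPEC =====
def Spec_select_attendance_events_fields_py (rows : List (List (String × Int))) (out : List String) : Prop := out = select_attendance_events_fields_py_alt rows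
instance (rows : List (List (String × Int))) (out : List String) : Decidable (Spec_select_attendance_events_fields_py rows out) := by unfold Spec_select_attendance_events_fields_py; infer_instance

-- ===== CLAIM (what is proved, stated in full; the proofs are below) =====
def Claim_equal_select_attendance_events_fields_py : Prop := ∀ (rows : List (List (String × Int))), Dom_select_attendance_events_fields_py rows → Spec_select_attendance_events_fields_py rows (select_attendance_events_fields_py rows)

-- ===== LEMMAS AND PROOFS =====

-- the flattened key stream of the rows
def pvKeys (rows : List (List (String × Int))) : List String :=
  rows.flatMap (fun r => r.map Prod.fst)

-- A's dedup fold
def pvF (acc : List String) (l : List String) : List String :=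
  l.foldl (fun a k => if a.contains k then a else a ++ [k]) acc

-- the rank B assigns to a key of uniq
def pvRankOf (uniq : List String) (k : String) : Int :=
  if k ∈ pvPreferredOrder then (pvPreferredOrder.idxOf k : Int)
  else (pvPreferredOrder.length : Int) + (uniq.idxOf k : Int)

theorem pvF_cons (acc : List String) (k : String) (l : List String) :
    pvF acc (k :: l) = pvF (if acc.contains k then acc else acc ++ [k]) l := rfl

theorem pvA_keys (rows : List (List (String × Int))) (acc : List String) :
    rows.foldl (fun acc r =>
        r.foldl (fun acc kv => if acc.contains kv.1 then acc else acc ++ [kv.1]) acc) acc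
      = pvF acc (pvKeys rows) := by
  induction rows generalizing acc with
  | nil => simp [pvKeys, pvF]
  | cons r rs ih =>
      simp only [List.foldl_cons, ih, pvKeys, pvF, List.flatMap_cons, List.foldl_append,
        List.foldl_map]

-- A's from-empty dedup fold IS first-seen dedup
theorem pvF_eq_dedup (l : List String) : pvF [] l = PySem.List.dedup l := rfl

theorem pvNodup_F (l : List String) (acc : List String) (h : acc.Nodup) :
    (pvF acc l).Nodup := by
  induction l generalizing acc with
  | nil => simpa [pvF]
  | cons k l ih =>
      rw [pvF_cons]
      by_cases hk : k ∈ acc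
      · rw [if_pos (by simp [hk])]
        exact ih acc h
      · rw [if_neg (by simp [hk])]
        refine ih _ ?_
        have hd : ∀ a ∈ acc, ¬a = k := fun a ha e => hk (e ▸ ha)
        simp [List.nodup_append, h]
        exact hd

theorem pvF_eq_append_filter (l : List String) (acc : List String) (h : l.Nodup) :
    pvF acc l = acc ++ l.filter (fun k => !acc.contains k) := by
  induction l generalizing acc with
  | nil => simp [pvF]
  | cons k l ih =>
      rcases List.nodup_cons.mp h with ⟨hk, hl⟩
      rw [pvF_cons, List.filter_cons]
      by_cases hc : k ∈ acc
      · rw [if_pos (by simp [hc]), ih acc hl]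
        have hb : (!acc.contains k) = false := by simp [hc]
        rw [hb]
        simp
      · rw [if_neg (by simp [hc]), ih _ hl]
        have hb : (!acc.contains k) = true := by simp [hc]
        rw [hb, if_pos rfl]
        have hfc : l.filter (fun x => !(acc ++ [k]).contains x) = l.filter (fun x => !acc.contains x) := by
          apply List.filter_congr
          intro x hx
          have hxk : x ≠ k := fun e => hk (e ▸ hx)
          simp [List.mem_append, hxk]
        rw [hfc]
        simp

-- lookup in a dict built by one insert per (index, element) of enumerate
theorem pvBuild_getD_of_not_mem (l : List String) (v : Int → String → Int) (s : Int)
    (d0 : PySem.Dict String Int) (k : String) (dflt : Int) (hk : k ∉ l) :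
    PySem.Dict.getD ((PySem.List.enumerate l s).foldl
        (fun d p => PySem.Dict.insert d p.2 (v p.1 p.2)) d0) k dflt
      = PySem.Dict.getD d0 k dflt := by
  induction l generalizing s d0 with
  | nil => simp [PySem.List.enumerate]
  | cons x xs ih =>
      simp only [List.mem_cons, not_or] at hk
      rw [PySem.List.enumerate_cons, List.foldl_cons, ih _ _ hk.2,
        PySem.Dict.getD_insert, if_neg hk.1]

theorem pvBuild_getD_of_mem (l : List String) (v : Int → String → Int) (s : Int)
    (d0 : PySem.Dict String Int) (k : String) (dflt : Int) (hnd : l.Nodup) (hk : k ∈ l) :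
    PySem.Dict.getD ((PySem.List.enumerate l s).foldl
        (fun d p => PySem.Dict.insert d p.2 (v p.1 p.2)) d0) k dflt
      = v (s + (l.idxOf k : Int)) k := by
  induction l generalizing s d0 with
  | nil => simp at hk
  | cons x xs ih =>
      rcases List.nodup_cons.mp hnd with ⟨hx, hxs⟩
      rw [PySem.List.enumerate_cons, List.foldl_cons]
      rcases List.mem_cons.mp hk with rfl | hkxs
      · rw [pvBuild_getD_of_not_mem _ _ _ _ _ _ hx, PySem.Dict.getD_insert, if_pos rfl,
          List.idxOf_cons_self]
        norm_num
      · have hne : k ≠ x := fun e => hx (e ▸ hkxs)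
        rw [ih _ _ hxs hkxs, List.idxOf_cons_ne _ (Ne.symm hne)]
        congr 1
        push_cast
        ring

-- members of a Nodup list are ordered by idxOf
theorem pvPairwise_idxOf (l : List String) (h : l.Nodup) :
    l.Pairwise (fun a b => l.idxOf a < l.idxOf b) := by
  rw [List.pairwise_iff_getElem]
  intro i j hi hj hij
  rw [List.Nodup.idxOf_getElem h i hi, List.Nodup.idxOf_getElem h j hj]
  exact hij

-- B's key function agrees with pvRankOf on uniq
theorem pvKey_eq_rankOf (uniq : List String) (hnd : uniq.Nodup) (k : String) (hk : k ∈ uniq) :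
    PySem.Dict.getD
      ((PySem.List.enumerate uniq).foldl
        (fun d p => PySem.Dict.insert d p.2
          (PySem.Dict.getD
            ((PySem.List.enumerate pvPreferredOrder).foldl
              (fun d p => PySem.Dict.insert d p.2 p.1) PySem.Dict.empty)
            p.2 ((pvPreferredOrder.length : Int) + p.1))) PySem.Dict.empty) k 0
      = pvRankOf uniq k := by
  have h1 := pvBuild_getD_of_mem uniq
    (fun i k' => PySem.Dict.getD
      ((PySem.List.enumerate pvPreferredOrder).foldl
        (fun d p => PySem.Dict.insert d p.2 p.1) PySem.Dict.empty)
      k' ((pvPreferredOrder.length : Int) + i)) 0 PySem.Dict.empty k 0 hnd hk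
  simp only [] at h1
  rw [h1, zero_add]
  by_cases hp : k ∈ pvPreferredOrder
  · have h2 := pvBuild_getD_of_mem pvPreferredOrder (fun i _ => i) 0 PySem.Dict.empty k
      ((pvPreferredOrder.length : Int) + (uniq.idxOf k : Int)) (by decide) hp
    simp only [] at h2
    rw [h2, zero_add]
    simp [pvRankOf, hp]
  · have h3 := pvBuild_getD_of_not_mem pvPreferredOrder (fun i _ => i) 0 PySem.Dict.empty k
      ((pvPreferredOrder.length : Int) + (uniq.idxOf k : Int)) hp
    simp only [] at h3
    rw [h3]
    simp [pvRankOf, hp, PySem.Dict.getD_empty]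

-- B's sort names A's target list: preferred-and-present first, then the rest in first-seen order
theorem pvSorted_eq (uniq : List String) (hnd : uniq.Nodup) :
    PySem.List.sorted uniq
      (fun k => PySem.Dict.getD
        ((PySem.List.enumerate uniq).foldl
          (fun d p => PySem.Dict.insert d p.2
            (PySem.Dict.getD
              ((PySem.List.enumerate pvPreferredOrder).foldl
                (fun d p => PySem.Dict.insert d p.2 p.1) PySem.Dict.empty)
              p.2 ((pvPreferredOrder.length : Int) + p.1))) PySem.Dict.empty) k 0) false
      = pvPreferredOrder.filter (fun k => uniq.contains k)
        ++ uniq.filter (fun k => !pvPreferredOrder.contains k) := by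
  have hprefnd : pvPreferredOrder.Nodup := by decide
  have hOn : (pvPreferredOrder.filter (fun k => uniq.contains k)
      ++ uniq.filter (fun k => !pvPreferredOrder.contains k)).Nodup := by
    refine (hprefnd.filter _).append (hnd.filter _) ?_
    intro a ha hb
    have h1 : a ∈ pvPreferredOrder := (List.mem_filter.mp ha).1
    have h2 := (List.mem_filter.mp hb).2
    simp [h1] at h2
  have hmem : ∀ a, a ∈ pvPreferredOrder.filter (fun k => uniq.contains k)
      ++ uniq.filter (fun k => !pvPreferredOrder.contains k) ↔ a ∈ uniq := by
    intro a
    constructor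
    · intro ha
      rcases List.mem_append.mp ha with h | h
      · simpa using (List.mem_filter.mp h).2
      · exact (List.mem_filter.mp h).1
    · intro h
      by_cases hp : a ∈ pvPreferredOrder
      · exact List.mem_append.mpr (Or.inl (List.mem_filter.mpr ⟨hp, by simpa using h⟩))
      · exact List.mem_append.mpr (Or.inr (List.mem_filter.mpr ⟨h, by simpa using hp⟩))
  have hperm : (pvPreferredOrder.filter (fun k => uniq.contains k)
      ++ uniq.filter (fun k => !pvPreferredOrder.contains k)).Perm uniq :=
    (List.perm_ext_iff_of_nodup hOn hnd).mpr hmem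
  have hrank : (pvPreferredOrder.filter (fun k => uniq.contains k)
      ++ uniq.filter (fun k => !pvPreferredOrder.contains k)).Pairwise
        (fun a b => pvRankOf uniq a < pvRankOf uniq b) := by
    rw [List.pairwise_append]
    refine ⟨?_, ?_, ?_⟩
    · have h1 : (pvPreferredOrder.filter (fun k => uniq.contains k)).Pairwise
          (fun a b => pvPreferredOrder.idxOf a < pvPreferredOrder.idxOf b) :=
        (pvPairwise_idxOf pvPreferredOrder hprefnd).sublist List.filter_sublist
      refine h1.imp_of_mem ?_
      intro a b ha hb hab
      have hpa : a ∈ pvPreferredOrder := (List.mem_filter.mp ha).1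
      have hpb : b ∈ pvPreferredOrder := (List.mem_filter.mp hb).1
      simp only [pvRankOf, if_pos hpa, if_pos hpb]
      exact_mod_cast hab
    · have h1 : (uniq.filter (fun k => !pvPreferredOrder.contains k)).Pairwise
          (fun a b => uniq.idxOf a < uniq.idxOf b) :=
        (pvPairwise_idxOf uniq hnd).sublist List.filter_sublist
      refine h1.imp_of_mem ?_
      intro a b ha hb hab
      have hpa : a ∉ pvPreferredOrder := by simpa using (List.mem_filter.mp ha).2
      have hpb : b ∉ pvPreferredOrder := by simpa using (List.mem_filter.mp hb).2
      simp only [pvRankOf, if_neg hpa, if_neg hpb]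
      have : (uniq.idxOf a : Int) < uniq.idxOf b := by exact_mod_cast hab
      omega
    · intro a ha b hb
      have hpa : a ∈ pvPreferredOrder := (List.mem_filter.mp ha).1
      have hpb : b ∉ pvPreferredOrder := by simpa using (List.mem_filter.mp hb).2
      simp only [pvRankOf, if_pos hpa, if_neg hpb]
      have h1 : pvPreferredOrder.idxOf a < pvPreferredOrder.length :=
        List.idxOf_lt_length_of_mem hpa
      omega
  refine PySem.List.sorted_eq_of_perm_of_pairwise_lt _ _ _ hperm ?_
  refine hrank.imp_of_mem ?_
  intro a b ha hb hab
  rw [pvKey_eq_rankOf uniq hnd a ((hmem a).mp ha), pvKey_eq_rankOf uniq hnd b ((hmem b).mp hb)]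
  exact hab

-- ===== VERDICT (by name: the statement is the Claim_ definition above) =====
theorem select_attendance_events_fields_py_spec : Claim_equal_select_attendance_events_fields_py := by
  intro rows _
  unfold Spec_select_attendance_events_fields_py
  simp only [select_attendance_events_fields_py, select_attendance_events_fields_py_alt]
  rw [pvSorted_eq (PySem.List.dedup (rows.flatMap (fun r => r.map Prod.fst)))
    (PySem.List.nodup_dedup _)]
  by_cases h : rows = []
  · subst h
    rfl
  · rw [if_neg h, pvA_keys]
    have hu : PySem.List.dedup (rows.flatMap (fun r => r.map Prod.fst)) = pvF [] (pvKeys rows) :=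
      (pvF_eq_dedup (pvKeys rows)).symm
    rw [hu]
    have hnd : (pvF [] (pvKeys rows)).Nodup := pvNodup_F _ _ (by simp)
    refine (pvF_eq_append_filter _ _ hnd).trans ?_
    congr 1
    apply List.filter_congr
    intro x hx
    by_cases hp : x ∈ pvPreferredOrder
    · simp [List.mem_filter, hp, hx]
    · simp [List.mem_filter, hp]
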